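-- pv_equiv track=rewrite | github.com/scl2589/Algorithm_problem_solving | SWEA/5203_베이비진 게임/5203_베이비진 게임.py | check
-- ===== SOURCE A (Python) =====
-- def check(deck):
--     deck.sort(key= lambda x: x)
--     #트리플 확인
--     for i in range(len(deck)-2):
--         if deck[i] == deck[i+1] and deck[i+1] == deck[i+2]:
--             return True
--     #런 확인
--     for i in range(len(deck)-2):
--         if deck[i]+1 == deck[i+1] and deck[i+1]+1 == deck[i+2]:
--             return True
--     else:
--         return False
-- ===== SOURCE B (Python) =====
-- def check(deck):
--     deck.sort()
--     counts = {}
--     for v in deck: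
--         counts[v] = counts.get(v, 0) + 1
--     if any(n >= 3 for n in counts.values()):
--         return True
--     return any(x + 1 in counts and x + 2 in counts for x in counts)
-- ===== Notes on version B (the rewrite author's own statement) =====
-- stated objective: alternative
-- what changed: Replaces A's two positional adjacent-window scans over the sorted list by a frequency map: a triple is a value with count >= 3 and a run is a value x with x+1 and x+2 also present.
-- intended difference: On decks with no triple that contain some x, x+1, x+2 but where every candidate middle card x+1 is duplicated (e.g. [1,2,2,3]), A returns False because the duplicate breaks its adjacent-window scan, while B returns True; a run of three consecutive values is present, so True is the intended answer. — e.g. on check([1, 2, 2, 3]): A returns false, B returns true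
import Mathlib
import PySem

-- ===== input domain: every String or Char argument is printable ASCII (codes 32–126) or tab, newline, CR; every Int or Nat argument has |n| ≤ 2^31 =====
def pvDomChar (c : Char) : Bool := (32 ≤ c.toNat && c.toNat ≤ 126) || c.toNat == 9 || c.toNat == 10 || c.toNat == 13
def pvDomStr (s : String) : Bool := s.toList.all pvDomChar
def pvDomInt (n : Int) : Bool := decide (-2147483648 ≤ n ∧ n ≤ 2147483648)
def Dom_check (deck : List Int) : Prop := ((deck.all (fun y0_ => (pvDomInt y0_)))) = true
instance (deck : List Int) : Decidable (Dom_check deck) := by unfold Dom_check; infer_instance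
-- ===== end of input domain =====

-- B replaces A's two positional window scans of the sorted deck by a frequency map
-- (count >= 3 for a triple; x, x+1, x+2 all present for a run); both Pythons sort
-- `deck` in place, and the equivalence proved here is about the return value.

-- ===== PORT A =====
def check (deck : List Int) : Bool :=
  let d := PySem.List.sorted deck (fun x => x) false
  -- 트리플 확인 (triple scan)
  if (PySem.List.pyRange 0 ((d.length : Int) - 2) 1).any (fun i =>
       PySem.List.pyGetD d i 0 == PySem.List.pyGetD d (i+1) 0 &&
       PySem.List.pyGetD d (i+1) 0 == PySem.List.pyGetD d (i+2) 0) then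
    true
  -- 런 확인 (run scan)
  else if (PySem.List.pyRange 0 ((d.length : Int) - 2) 1).any (fun i =>
       PySem.List.pyGetD d i 0 + 1 == PySem.List.pyGetD d (i+1) 0 &&
       PySem.List.pyGetD d (i+1) 0 + 1 == PySem.List.pyGetD d (i+2) 0) then
    true
  else
    false

-- ===== PORT B =====
def check_alt (deck : List Int) : Bool :=
  let d := PySem.List.sorted deck (fun x => x) false
  let counts : PySem.Dict Int Int := d.foldl (fun c v => c.modify v 0 (· + 1)) PySem.Dict.empty
  if counts.values.any (fun n => decide (3 ≤ n)) then
    true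
  else
    counts.keys.any (fun x => counts.contains (x + 1) && counts.contains (x + 2))

-- ===== PRECONDITION & SPEC =====
-- On decks with no triple that contain some x, x+1, x+2 but where every candidate middle
-- card x+1 is duplicated, A returns False (the duplicate breaks its adjacent-window scan)
-- while B returns True; a run of three consecutive values is present, so True is intended.
def D_check (deck : List Int) : Prop :=
  (∀ v ∈ deck, deck.count v ≤ 2) ∧
  (∃ x ∈ deck, (x + 1) ∈ deck ∧ (x + 2) ∈ deck) ∧
  ¬ (∃ x ∈ deck, deck.count (x + 1) = 1 ∧ (x + 2) ∈ deck)
instance (deck : List Int) : Decidable (D_check deck) := by unfold D_check; infer_instance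

def Spec_check (deck : List Int) (out : Bool) : Prop := ¬ D_check deck → out = check_alt deck
instance (deck : List Int) (out : Bool) : Decidable (Spec_check deck out) := by unfold Spec_check; infer_instance

def pvDiffWitness_check : List Int := [1, 2, 2, 3]
def pvDiffWitnessOut_check : Bool × Bool := (false, true)

-- ===== CLAIM (what is proved, stated in full; the proofs are below) =====
def Claim_unchanged_check : Prop := ∀ (deck : List Int), Dom_check deck → Spec_check deck (check deck)
def Claim_changed_check : Prop := Dom_check (pvDiffWitness_check) ∧ D_check (pvDiffWitness_check) ∧ check (pvDiffWitness_check) = pvDiffWitnessOut_check.1 ∧ check_alt (pvDiffWitness_check) = pvDiffWitnessOut_check.2 ∧ pvDiffWitnessOut_check.1 ≠ pvDiffWitnessOut_check.2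
def Claim_exact_check : Prop := ∀ (deck : List Int), Dom_check deck → D_check deck → check deck ≠ check_alt deck

-- ===== LEMMAS AND PROOFS =====

-- Both scans in A test a predicate on every adjacent 3-window of the sorted list;
-- such a window exists iff the list splits around it.
def pvWindowProp (p : Int → Int → Int → Bool) (l : List Int) : Prop :=
  ∃ u a b c v, l = u ++ a :: b :: c :: v ∧ p a b c = true

theorem pv_pyGetD_toNat (l : List Int) (i : Int) (h0 : 0 ≤ i) (h1 : i < (l.length : Int)) :
    PySem.List.pyGetD l i 0 = l.getD i.toNat 0 := by
  rw [PySem.List.pyGetD_eq_getElem l 0 h0 h1, List.getD_eq_getElem l 0 (by omega)]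

theorem pv_any_window_iff (p : Int → Int → Int → Bool) (l : List Int) :
    ((PySem.List.pyRange 0 ((l.length : Int) - 2) 1).any (fun i =>
       p (PySem.List.pyGetD l i 0) (PySem.List.pyGetD l (i+1) 0) (PySem.List.pyGetD l (i+2) 0)) = true)
    ↔ pvWindowProp p l := by
  rw [List.any_eq_true]
  constructor
  · rintro ⟨i, hmem, hp⟩
    rw [PySem.List.mem_pyRange_one] at hmem
    obtain ⟨h0, h2⟩ := hmem
    rw [pv_pyGetD_toNat l i h0 (by omega), pv_pyGetD_toNat l (i+1) (by omega) (by omega),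
        pv_pyGetD_toNat l (i+2) (by omega) (by omega)] at hp
    set j := i.toNat with hj
    have hj2 : j + 2 < l.length := by omega
    rw [show (i+1).toNat = j + 1 by omega, show (i+2).toNat = j + 2 by omega] at hp
    rw [List.getD_eq_getElem l 0 (by omega), List.getD_eq_getElem l 0 (by omega),
        List.getD_eq_getElem l 0 (by omega)] at hp
    refine ⟨l.take j, l[j], l[j+1], l[j+2], l.drop (j+3), ?_, hp⟩
    have e1 : l.drop j = l[j] :: l.drop (j+1) := List.drop_eq_getElem_cons (by omega)
    have e2 : l.drop (j+1) = l[j+1] :: l.drop (j+2) := List.drop_eq_getElem_cons (by omega)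
    have e3 : l.drop (j+2) = l[j+2] :: l.drop (j+3) := List.drop_eq_getElem_cons (by omega)
    calc l = l.take j ++ l.drop j := (List.take_append_drop j l).symm
      _ = _ := by rw [e1, e2, e3]
  · rintro ⟨u, a, b, c, v, rfl, hp⟩
    have hL : ((u ++ a :: b :: c :: v).length : Int) = (u.length : Int) + 3 + v.length := by
      simp [List.length_append]; omega
    refine ⟨(u.length : Int), ?_, ?_⟩
    · rw [PySem.List.mem_pyRange_one]
      omega
    · rw [pv_pyGetD_toNat _ _ (by positivity) (by omega),
          pv_pyGetD_toNat _ _ (by positivity) (by omega),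
          pv_pyGetD_toNat _ _ (by positivity) (by omega),
          show ((u.length : Int)).toNat = u.length + 0 by omega,
          show ((u.length : Int) + 1).toNat = u.length + 1 by omega,
          show ((u.length : Int) + 2).toNat = u.length + 2 by omega]
      rw [List.getD_append_right _ _ _ _ (by omega), List.getD_append_right _ _ _ _ (by omega),
          List.getD_append_right _ _ _ _ (by omega)]
      simpa using hp

-- In a ≤-sorted list with head x, any member ≤ x equals x.
theorem pv_head_eq {x v : Int} {t : List Int}
    (hp : (x :: t).Pairwise (· ≤ ·)) (hv : v ∈ x :: t) (hle : v ≤ x) : x = v := by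
  rcases List.mem_cons.mp hv with h | h
  · omega
  · have := (List.pairwise_cons.mp hp).1 v h
    omega

-- Triple scan on a sorted list ↔ some value has count ≥ 3.
theorem pv_tri_iff (l : List Int) (hp : l.Pairwise (· ≤ ·)) :
    pvWindowProp (fun a b c => a == b && b == c) l ↔ ∃ v ∈ l, 3 ≤ l.count v := by
  constructor
  · rintro ⟨u, a, b, c, v, rfl, hw⟩
    simp only [Bool.and_eq_true, beq_iff_eq] at hw
    obtain ⟨rfl, rfl⟩ := hw
    refine ⟨a, by simp, ?_⟩
    simp [List.count_append]
    omega
  · rintro ⟨v, hv, h3⟩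
    obtain ⟨s, t, rfl, hvs⟩ := List.eq_append_cons_of_mem hv
    have hps := List.pairwise_append.mp hp
    have hcs : s.count v = 0 := List.count_eq_zero.mpr hvs
    have hct : 2 ≤ t.count v := by
      simp only [List.count_append, List.count_cons_self, hcs] at h3
      omega
    have hvt : v ∈ t := List.count_pos_iff.mp (by omega)
    obtain ⟨w, t', rfl⟩ : ∃ w t', t = w :: t' := by
      cases t with
      | nil => simp at hvt
      | cons w t' => exact ⟨w, t', rfl⟩
    have hpv : (v :: w :: t').Pairwise (· ≤ ·) := hps.2.1
    have hw : w = v :=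
      pv_head_eq (List.pairwise_cons.mp hpv).2 hvt ((List.pairwise_cons.mp hpv).1 w (by simp))
    have hvt' : v ∈ t' := by
      rw [hw, List.count_cons_self] at hct
      exact List.count_pos_iff.mp (by omega)
    obtain ⟨w2, t'', rfl⟩ : ∃ w2 t'', t' = w2 :: t'' := by
      cases t' with
      | nil => simp at hvt'
      | cons w2 t'' => exact ⟨w2, t'', rfl⟩
    have hpv2 : (w :: w2 :: t'').Pairwise (· ≤ ·) := (List.pairwise_cons.mp hpv).2
    have hw2 : w2 = v := by
      have h1 : w ≤ w2 := (List.pairwise_cons.mp hpv2).1 w2 (by simp)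
      have := pv_head_eq (List.pairwise_cons.mp hpv2).2 hvt' (by omega)
      omega
    refine ⟨s, v, v, v, t'', by rw [hw, hw2], by simp⟩

-- Run scan on a sorted list ↔ some x has x present, x+1 with count exactly 1, x+2 present.
theorem pv_run_iff (l : List Int) (hp : l.Pairwise (· ≤ ·)) :
    pvWindowProp (fun a b c => a + 1 == b && b + 1 == c) l ↔
    ∃ x ∈ l, l.count (x + 1) = 1 ∧ (x + 2) ∈ l := by
  constructor
  · rintro ⟨u, a, b, c, v, rfl, hw⟩
    simp only [Bool.and_eq_true, beq_iff_eq] at hw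
    obtain ⟨rfl, rfl⟩ := hw
    have hps := List.pairwise_append.mp hp
    refine ⟨a, by simp, ?_, by simp [show a + 1 + 1 = a + 2 by ring]⟩
    have hcu : u.count (a + 1) = 0 := by
      refine List.count_eq_zero.mpr (fun hmem => ?_)
      have := hps.2.2 _ hmem a (by simp)
      omega
    have hpv : (a :: (a+1) :: (a+1+1) :: v).Pairwise (· ≤ ·) := hps.2.1
    have hcv : v.count (a + 1) = 0 := by
      refine List.count_eq_zero.mpr (fun hmem => ?_)
      have := (List.pairwise_cons.mp (List.pairwise_cons.mp (List.pairwise_cons.mp hpv).2).2).1 _ hmem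
      omega
    simp [List.count_append, hcu, hcv]
  · rintro ⟨x, hx, h1, h2⟩
    have hmem1 : (x + 1) ∈ l := List.count_pos_iff.mp (by omega)
    obtain ⟨s, t, rfl, hns⟩ := List.eq_append_cons_of_mem hmem1
    have hps := List.pairwise_append.mp hp
    have hcs : s.count (x + 1) = 0 := List.count_eq_zero.mpr hns
    have hnt : (x + 1) ∉ t := by
      refine List.count_eq_zero.mp ?_
      simp only [List.count_append, List.count_cons_self, hcs] at h1
      omega
    have hxs : x ∈ s := by
      rcases List.mem_append.mp hx with h | h
      · exact h
      · rcases List.mem_cons.mp h with h' | h'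
        · omega
        · have := (List.pairwise_cons.mp hps.2.1).1 _ h'
          omega
    have hx2t : (x + 2) ∈ t := by
      rcases List.mem_append.mp h2 with h | h
      · have := hps.2.2 _ h (x + 1) (by simp)
        omega
      · rcases List.mem_cons.mp h with h' | h'
        · omega
        · exact h'
    obtain ⟨s', y, hs⟩ : ∃ s' y, s = s' ++ [y] := by
      rcases List.eq_nil_or_concat s with h | ⟨s', y, h⟩
      · rw [h] at hxs
        simp at hxs
      · exact ⟨s', y, by simpa using h⟩
    have hy : y = x := by
      have hyle : y ≤ x + 1 := hps.2.2 y (by simp [hs]) (x + 1) (by simp)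
      have hyne : y ≠ x + 1 := fun h => hns (by simp [hs, h])
      rw [hs] at hxs
      rcases List.mem_append.mp hxs with h | h
      · have hpss : (s' ++ [y]).Pairwise (· ≤ ·) := by rw [← hs]; exact hps.1
        have := (List.pairwise_append.mp hpss).2.2 x h y (by simp)
        omega
      · simp at h
        omega
    obtain ⟨z, t'', ht⟩ : ∃ z t'', t = z :: t'' := by
      cases t with
      | nil => simp at hx2t
      | cons z t'' => exact ⟨z, t'', rfl⟩
    have hz : z = x + 2 := by
      have hzle : x + 1 ≤ z := (List.pairwise_cons.mp hps.2.1).1 z (by simp [ht])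
      have hzne : z ≠ x + 1 := fun h => hnt (by simp [ht, h])
      rw [ht] at hx2t
      rcases List.mem_cons.mp hx2t with h | h
      · omega
      · have hpt : (z :: t'').Pairwise (· ≤ ·) := by
          rw [← ht]
          exact (List.pairwise_cons.mp hps.2.1).2
        have := (List.pairwise_cons.mp hpt).1 _ h
        omega
    refine ⟨s', x, x + 1, x + 2, t'', ?_, ?_⟩
    · rw [hs, ht, hy, hz]
      simp
    · simp only [Bool.and_eq_true, beq_iff_eq]
      exact ⟨trivial, by ring⟩

-- A's result, characterised over the original deck (counts/membership are
-- permutation-invariant, and sorted deck is a permutation of deck).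
theorem pv_check_iff (deck : List Int) :
    check deck = true ↔
    ((∃ v ∈ deck, 3 ≤ deck.count v) ∨ (∃ x ∈ deck, deck.count (x + 1) = 1 ∧ (x + 2) ∈ deck)) := by
  set d := PySem.List.sorted deck (fun x => x) false with hd
  have hp : d.Pairwise (· ≤ ·) := PySem.List.sorted_pairwise deck (fun x => x)
  have hperm : d.Perm deck := PySem.List.sorted_perm deck (fun x => x) false
  have hmem : ∀ x : Int, x ∈ d ↔ x ∈ deck := fun x => PySem.List.mem_sorted _ _ _ _
  have hcnt : ∀ x : Int, d.count x = deck.count x := fun x => hperm.count_eq x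
  have hA : check deck = (if ((PySem.List.pyRange 0 ((d.length : Int) - 2) 1).any (fun i =>
       PySem.List.pyGetD d i 0 == PySem.List.pyGetD d (i+1) 0 &&
       PySem.List.pyGetD d (i+1) 0 == PySem.List.pyGetD d (i+2) 0)) then true
    else if ((PySem.List.pyRange 0 ((d.length : Int) - 2) 1).any (fun i =>
       PySem.List.pyGetD d i 0 + 1 == PySem.List.pyGetD d (i+1) 0 &&
       PySem.List.pyGetD d (i+1) 0 + 1 == PySem.List.pyGetD d (i+2) 0)) then true
    else false) := rfl
  have atri := (pv_any_window_iff (fun a b c => a == b && b == c) d).trans (pv_tri_iff d hp)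
  have arun := (pv_any_window_iff (fun a b c => a + 1 == b && b + 1 == c) d).trans (pv_run_iff d hp)
  rw [hA]
  have hor : ∀ a b : Bool, (if a = true then true else if b = true then true else false) = (a || b) := by
    decide
  rw [hor, Bool.or_eq_true]
  constructor
  · rintro (h | h)
    · obtain ⟨v, hv, h3⟩ := atri.mp h
      exact Or.inl ⟨v, (hmem v).mp hv, by rw [← hcnt]; exact h3⟩
    · obtain ⟨x, hx, h1, h2⟩ := arun.mp h
      exact Or.inr ⟨x, (hmem x).mp hx, by rw [← hcnt]; exact h1, (hmem _).mp h2⟩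
  · rintro (⟨v, hv, h3⟩ | ⟨x, hx, h1, h2⟩)
    · exact Or.inl (atri.mpr ⟨v, (hmem v).mpr hv, by rw [hcnt]; exact h3⟩)
    · exact Or.inr (arun.mpr ⟨x, (hmem x).mpr hx, by rw [hcnt]; exact h1, (hmem _).mpr h2⟩)

-- B's result, characterised over the original deck.
theorem pv_alt_iff (deck : List Int) :
    check_alt deck = true ↔
    ((∃ v ∈ deck, 3 ≤ deck.count v) ∨ (∃ x ∈ deck, (x + 1) ∈ deck ∧ (x + 2) ∈ deck)) := by
  set d := PySem.List.sorted deck (fun x => x) false with hd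
  have hperm : d.Perm deck := PySem.List.sorted_perm deck (fun x => x) false
  have hmem : ∀ x : Int, x ∈ d ↔ x ∈ deck := fun x => PySem.List.mem_sorted _ _ _ _
  have hcnt : ∀ x : Int, d.count x = deck.count x := fun x => hperm.count_eq x
  have hc : (List.foldl (fun c v => c.modify v 0 (· + 1)) PySem.Dict.empty d : PySem.Dict Int Int)
      = PySem.Dict.counter d := rfl
  have hB : check_alt deck = (if (PySem.Dict.counter d).values.any (fun n => decide (3 ≤ n)) then true
    else (PySem.Dict.counter d).keys.any (fun x =>
      (PySem.Dict.counter d).contains (x + 1) && (PySem.Dict.counter d).contains (x + 2))) := by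
    simp only [check_alt]
    rw [hc]
  have btri : ((PySem.Dict.counter d).values.any (fun n => decide (3 ≤ n)) = true)
      ↔ ∃ v ∈ d, 3 ≤ d.count v := by
    rw [PySem.Dict.values_eq_map_keys _ (PySem.Dict.nodup_keys_counter d) 0, List.any_map,
        List.any_eq_true]
    constructor
    · rintro ⟨k, hk, hdec⟩
      rw [PySem.Dict.keys_counter, PySem.Set.mem_ofList] at hk
      rw [Function.comp_apply, PySem.Dict.getD_counter] at hdec
      exact ⟨k, hk, by simpa using hdec⟩
    · rintro ⟨v, hv, h3⟩
      refine ⟨v, ?_, ?_⟩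
      · rw [PySem.Dict.keys_counter, PySem.Set.mem_ofList]
        exact hv
      · rw [Function.comp_apply, PySem.Dict.getD_counter]
        simpa using h3
  have brun : ((PySem.Dict.counter d).keys.any (fun x =>
        (PySem.Dict.counter d).contains (x + 1) && (PySem.Dict.counter d).contains (x + 2)) = true)
      ↔ ∃ x ∈ d, (x + 1) ∈ d ∧ (x + 2) ∈ d := by
    rw [List.any_eq_true]
    constructor
    · rintro ⟨x, hx, hcond⟩
      rw [PySem.Dict.keys_counter, PySem.Set.mem_ofList] at hx
      simp only [Bool.and_eq_true, PySem.Dict.contains_counter, List.contains_eq_mem, decide_eq_true_eq] at hcond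
      exact ⟨x, hx, hcond.1, hcond.2⟩
    · rintro ⟨x, hx, h1, h2⟩
      refine ⟨x, ?_, ?_⟩
      · rw [PySem.Dict.keys_counter, PySem.Set.mem_ofList]
        exact hx
      · simp [PySem.Dict.contains_counter, h1, h2]
  have hor2 : ∀ a b : Bool, (if a = true then true else b) = (a || b) := by decide
  rw [hB, hor2, Bool.or_eq_true]
  constructor
  · rintro (h | h)
    · obtain ⟨v, hv, h3⟩ := btri.mp h
      exact Or.inl ⟨v, (hmem v).mp hv, by rw [← hcnt]; exact h3⟩
    · obtain ⟨x, hx, h1, h2⟩ := brun.mp h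
      exact Or.inr ⟨x, (hmem x).mp hx, (hmem _).mp h1, (hmem _).mp h2⟩
  · rintro (⟨v, hv, h3⟩ | ⟨x, hx, h1, h2⟩)
    · exact Or.inl (btri.mpr ⟨v, (hmem v).mpr hv, by rw [hcnt]; exact h3⟩)
    · exact Or.inr (brun.mpr ⟨x, (hmem x).mpr hx, (hmem _).mpr h1, (hmem _).mpr h2⟩)

-- ===== VERDICT =====
theorem check_spec : Claim_unchanged_check := by
  intro deck _
  unfold Spec_check
  intro hnD
  have hA := pv_check_iff deck
  have hB := pv_alt_iff deck
  unfold D_check at hnD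
  rw [Bool.eq_iff_iff, hA, hB]
  constructor
  · rintro (h | ⟨x, hx, h1, h2⟩)
    · exact Or.inl h
    · exact Or.inr ⟨x, hx, List.count_pos_iff.mp (by omega), h2⟩
  · rintro (h | hrun)
    · exact Or.inl h
    · by_cases htri : ∃ v ∈ deck, 3 ≤ deck.count v
      · exact Or.inl htri
      · have hD1 : ∀ v ∈ deck, deck.count v ≤ 2 := by
          intro v hv
          by_contra hc
          exact htri ⟨v, hv, by omega⟩
        by_cases hA3 : ∃ x ∈ deck, deck.count (x + 1) = 1 ∧ (x + 2) ∈ deck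
        · exact Or.inr hA3
        · exact absurd ⟨hD1, hrun, hA3⟩ hnD

theorem check_changed : Claim_changed_check := by
  unfold Claim_changed_check
  decide

theorem check_tight : Claim_exact_check := by
  intro deck _ hD
  obtain ⟨hD1, hD2, hD3⟩ := hD
  have hA : check deck = false := by
    rw [← Bool.not_eq_true, pv_check_iff]
    rintro (⟨v, hv, h3⟩ | h)
    · have := hD1 v hv
      omega
    · exact hD3 h
  have hB : check_alt deck = true := (pv_alt_iff deck).mpr (Or.inr hD2)
  rw [hA, hB]
  simp
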